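-- pv_equiv track=rewrite | github.com/Bismyth/QuickBreach | main.py | findAnsReq
-- ===== SOURCE A (Python) =====
-- import math, itertools, functools
--
-- def findAnsReq(board, targets):
--   size = math.isqrt(len(board))
--
--   def searchCol(line, path: list[int], subTarget):
--     for x in range(size):
--       pos = line + x*size
--       if subTarget[0] != -1 and board[pos] != subTarget[0]: continue
--       if pos in path: continue
--       if len(subTarget) == 1:
--         return path + [pos]
--       validPath = searchRow(x, path + [pos], subTarget[1:])
--       if validPath is not None:
--         return validPath
--     return None
--
--   def searchRow(line, path, subTarget):
--     for x in range(size):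
--       pos = line * size + x
--       if subTarget[0] != -1 and board[pos] != subTarget[0]: continue
--       if pos in path: continue
--       if len(subTarget) == 1:
--         return path + [pos]
--       validPath = searchCol(x, path + [pos], subTarget[1:])
--       if validPath is not None:
--         return validPath
--     return None
--
--   for x in [functools.reduce(lambda a, b: a+b, x) for x in itertools.permutations(targets)]:
--     a = searchRow(0, [], x)
--     if a is not None:
--       return a
-- ===== SOURCE B (Python) =====
-- import math, itertools, functools
--
-- def findAnsReq(board, targets):
--   size = math.isqrt(len(board))
--
--   def dfs(target):
--     # iterative DFS over an explicit stack of frames (line, path, subTarget, isRow);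
--     # children pushed in reverse so pops reproduce left-to-right depth-first order
--     stack = [(0, [], target, True)]
--     while stack:
--       line, path, sub, isRow = stack.pop()
--       children = []
--       for x in range(size):
--         pos = line * size + x if isRow else line + x * size
--         if sub[0] != -1 and board[pos] != sub[0]: continue
--         if pos in path: continue
--         if len(sub) == 1:
--           return path + [pos]
--         children.append((x, path + [pos], sub[1:], not isRow))
--       stack.extend(reversed(children))
--     return None
--
--   for t in [functools.reduce(lambda a, b: a + b, p) for p in itertools.permutations(targets)]:
--     a = dfs(t)
--     if a is not None:
--       return a
-- ===== Notes on version B (the rewrite author's own statement) =====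
-- stated objective: alternative
-- what changed: A's two mutually recursive searchRow/searchCol functions are replaced by a single iterative depth-first search over an explicit stack of (line, path, subTarget, isRow) frames, pushing child frames in reverse so pops reproduce A's left-to-right first-match order.
-- outside the precondition, e.g. on findAnsReq([], []): A raises TypeError, B raises TypeError; on findAnsReq([1], [[]]): A raises IndexError, B raises IndexError
import Mathlib
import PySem

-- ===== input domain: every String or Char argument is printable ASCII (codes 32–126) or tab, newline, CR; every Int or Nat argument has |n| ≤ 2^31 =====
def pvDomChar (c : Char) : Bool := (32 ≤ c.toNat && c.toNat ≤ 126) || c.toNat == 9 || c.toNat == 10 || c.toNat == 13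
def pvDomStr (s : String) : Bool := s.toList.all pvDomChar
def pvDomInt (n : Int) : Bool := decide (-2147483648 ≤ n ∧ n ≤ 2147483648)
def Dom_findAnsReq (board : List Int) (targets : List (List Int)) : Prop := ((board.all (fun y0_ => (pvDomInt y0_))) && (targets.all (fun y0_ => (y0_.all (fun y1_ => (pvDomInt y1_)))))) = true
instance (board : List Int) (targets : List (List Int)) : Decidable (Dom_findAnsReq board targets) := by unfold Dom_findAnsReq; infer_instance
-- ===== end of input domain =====

-- B replaces A's two mutually recursive searchRow/searchCol with one iterative DFS over an
-- explicit stack of frames (objective: alternative decomposition, same asymptotic cost).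

-- ===== PORT A =====
-- itertools.permutations(l): pick each element in index order, permute the rest (Python's order).
def selectionsA {α : Type} : List α → List (α × List α)
  | [] => []
  | a :: rest => (a, rest) :: (selectionsA rest).map (fun p => (p.1, a :: p.2))

-- used by pyPermsA's decreasing_by
theorem selectionsA_snd_length {α : Type} : ∀ (l : List α) (p : α × List α), p ∈ selectionsA l → p.2.length + 1 = l.length := by
  intro l
  induction l with
  | nil => intro p hp; simp [selectionsA] at hp
  | cons a rest ih =>
    intro p hp
    simp only [selectionsA, List.mem_cons, List.mem_map] at hp
    rcases hp with h | ⟨q, hq, rfl⟩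
    · subst h; simp
    · have := ih q hq; simpa using this

def pyPermsA {α : Type} : List α → List (List α)
  | [] => [[]]
  | a :: rest => ((selectionsA (a :: rest)).attach).flatMap
      (fun p => (pyPermsA p.1.2).map (fun q => p.1.1 :: q))
termination_by l => l.length
decreasing_by
  have := selectionsA_snd_length (a :: rest) p.1 p.2
  simp at this ⊢
  omega

-- functools.reduce(lambda a, b: a + b, p); reduce over an empty permutation raises TypeError
-- (only when targets = [], excluded by Pre_)
def reduceConcat (p : List (List Int)) : List Int :=
  match p with
  | [] => []
  | h :: t => t.foldl (· ++ ·) h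

mutual
-- the 'for x in range(size)' loop of searchCol, recursing over the remaining x's
def colLoopA (board : List Int) (size : Nat) (line : Int) (path : List Int) (sub : List Int) (xs : List Int) : Option (List Int) :=
  match sub, xs with
  | _, [] => none
  | [], _ :: _ => none  -- subTarget[0] raises IndexError in Python; unreachable under Pre_
  | t0 :: trest, x :: xs' =>
    let pos : Int := line + x * (size : Int)
    if t0 ≠ -1 ∧ PySem.List.pyGet? board pos ≠ some t0 then colLoopA board size line path (t0 :: trest) xs'
    else if pos ∈ path then colLoopA board size line path (t0 :: trest) xs'
    else if trest = [] then some (path ++ [pos])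
    else
      match rowLoopA board size x (path ++ [pos]) trest (PySem.List.pyRange 0 (size : Int) 1) with
      | some v => some v
      | none => colLoopA board size line path (t0 :: trest) xs'
termination_by (sub.length, xs.length)

-- the 'for x in range(size)' loop of searchRow
def rowLoopA (board : List Int) (size : Nat) (line : Int) (path : List Int) (sub : List Int) (xs : List Int) : Option (List Int) :=
  match sub, xs with
  | _, [] => none
  | [], _ :: _ => none  -- subTarget[0] raises IndexError in Python; unreachable under Pre_
  | t0 :: trest, x :: xs' =>
    let pos : Int := line * (size : Int) + x
    if t0 ≠ -1 ∧ PySem.List.pyGet? board pos ≠ some t0 then rowLoopA board size line path (t0 :: trest) xs'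
    else if pos ∈ path then rowLoopA board size line path (t0 :: trest) xs'
    else if trest = [] then some (path ++ [pos])
    else
      match colLoopA board size x (path ++ [pos]) trest (PySem.List.pyRange 0 (size : Int) 1) with
      | some v => some v
      | none => rowLoopA board size line path (t0 :: trest) xs'
termination_by (sub.length, xs.length)
end

-- the outer 'for x in [...]: a = searchRow(0, [], x); if a is not None: return a'
def permLoopA (board : List Int) (size : Nat) : List (List Int) → Option (List Int)
  | [] => none
  | t :: ts =>
    match rowLoopA board size 0 [] t (PySem.List.pyRange 0 (size : Int) 1) with
    | some a => some a
    | none => permLoopA board size ts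

def findAnsReq (board : List Int) (targets : List (List Int)) : Option (List Int) :=
  let size := board.length.sqrt  -- math.isqrt(len(board))
  permLoopA board size ((pyPermsA targets).map reduceConcat)

-- ===== PORT B =====
-- one pass over a frame (line, path, sub, isRow): either the early 'return path + [pos]'
-- (Sum.inl) or the list of child frames collected left to right (Sum.inr)
def frameScanB (board : List Int) (size : Nat) (line : Int) (path : List Int) (sub : List Int) (isRow : Bool) : List Int → List Int ⊕ List (Int × List Int × List Int × Bool)
  | [] => Sum.inr []
  | x :: xs =>
    let pos : Int := if isRow then line * (size : Int) + x else line + x * (size : Int)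
    match sub with
    | [] => Sum.inr []  -- sub[0] raises IndexError in Python; unreachable under Pre_
    | t0 :: trest =>
      if t0 ≠ -1 ∧ PySem.List.pyGet? board pos ≠ some t0 then frameScanB board size line path sub isRow xs
      else if pos ∈ path then frameScanB board size line path sub isRow xs
      else if trest = [] then Sum.inl (path ++ [pos])
      else
        match frameScanB board size line path sub isRow xs with
        | Sum.inl p => Sum.inl p
        | Sum.inr cs => Sum.inr ((x, path ++ [pos], trest, !isRow) :: cs)

-- termination measure for the stack loop, and the lemmas its decreasing_by cites
def frameWeight (size : Nat) (f : Int × List Int × List Int × Bool) : Nat := (size + 1) ^ f.2.2.1.length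

theorem frameScanB_nil_sub (board : List Int) (size : Nat) (line : Int) (path : List Int) (isRow : Bool) (xs : List Int) :
    frameScanB board size line path [] isRow xs = Sum.inr [] := by
  cases xs <;> simp [frameScanB]

theorem frameScanB_inr_weight (board : List Int) (size : Nat) (line : Int) (path : List Int) (t0 : Int) (trest : List Int) (isRow : Bool) :
    ∀ (xs : List Int) (cs : List (Int × List Int × List Int × Bool)),
      frameScanB board size line path (t0 :: trest) isRow xs = Sum.inr cs →
      (cs.map (frameWeight size)).sum ≤ xs.length * (size + 1) ^ trest.length := by
  intro xs
  induction xs with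
  | nil =>
    intro cs h
    simp only [frameScanB] at h
    obtain rfl : cs = [] := by simpa using h.symm
    simp
  | cons x xs ih =>
    intro cs h
    simp only [frameScanB] at h
    generalize (if isRow then line * (size : Int) + x else line + x * (size : Int)) = pos at h
    have hw : 0 < (size + 1) ^ trest.length := Nat.pow_pos (by omega)
    split_ifs at h with h1 h2 h3
    · have := ih cs h; simp only [List.length_cons]; nlinarith
    · have := ih cs h; simp only [List.length_cons]; nlinarith
    · revert h
      cases hrec : frameScanB board size line path (t0 :: trest) isRow xs with
      | inl p => intro h; simp at h
      | inr cs2 =>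
        intro h
        have hb := ih cs2 hrec
        simp only [Sum.inr.injEq] at h
        subst h
        simp only [List.map_cons, List.sum_cons, List.length_cons, frameWeight]
        nlinarith

theorem weight_decrease (board : List Int) (size : Nat) (line : Int) (path : List Int) (sub : List Int) (isRow : Bool)
    (rest cs : List (Int × List Int × List Int × Bool))
    (h : frameScanB board size line path sub isRow (PySem.List.pyRange 0 (size : Int) 1) = Sum.inr cs) :
    ((cs ++ rest).map (frameWeight size)).sum < (((line, path, sub, isRow) :: rest).map (frameWeight size)).sum := by
  simp only [List.map_append, List.sum_append, List.map_cons, List.sum_cons]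
  have hlen : (PySem.List.pyRange 0 (size : Int) 1).length = size := by
    simp [PySem.List.length_pyRange_one]
  cases sub with
  | nil =>
    rw [frameScanB_nil_sub] at h
    obtain rfl : cs = [] := by simpa using h.symm
    simp [frameWeight]
  | cons t0 trest =>
    have hb := frameScanB_inr_weight board size line path t0 trest isRow _ cs h
    rw [hlen] at hb
    have hw : 0 < (size + 1) ^ trest.length := Nat.pow_pos (by omega)
    have hs : frameWeight size (line, path, t0 :: trest, isRow) = (size + 1) ^ trest.length * (size + 1) := by
      simp [frameWeight, pow_succ]
    rw [hs]
    nlinarith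

-- 'while stack: ... stack.pop() ... stack.extend(reversed(children))'; the head of the Lean
-- list is the top of the stack, so extending with the reversed children is 'cs ++ rest'
def stackLoopB (board : List Int) (size : Nat) (st : List (Int × List Int × List Int × Bool)) : Option (List Int) :=
  match st with
  | [] => none
  | (line, path, sub, isRow) :: rest =>
    match h : frameScanB board size line path sub isRow (PySem.List.pyRange 0 (size : Int) 1) with
    | Sum.inl p => some p
    | Sum.inr cs => stackLoopB board size (cs ++ rest)
termination_by (st.map (frameWeight size)).sum
decreasing_by exact weight_decrease board size line path sub isRow rest cs h

def permLoopB (board : List Int) (size : Nat) : List (List Int) → Option (List Int)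
  | [] => none
  | t :: ts =>
    match stackLoopB board size [(0, [], t, true)] with
    | some a => some a
    | none => permLoopB board size ts

def findAnsReq_alt (board : List Int) (targets : List (List Int)) : Option (List Int) :=
  let size := board.length.sqrt
  permLoopB board size ((pyPermsA targets).map reduceConcat)

-- ===== PRECONDITION & SPEC =====
-- A raises on an empty targets list (functools.reduce over an empty permutation: TypeError)
-- and when all targets are empty (subTarget[0]: IndexError); Pre_ excludes exactly those.
def Pre_findAnsReq (board : List Int) (targets : List (List Int)) : Prop :=
  targets ≠ [] ∧ targets.flatten ≠ []
instance (board : List Int) (targets : List (List Int)) : Decidable (Pre_findAnsReq board targets) := by unfold Pre_findAnsReq; infer_instance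

def pvWitness_findAnsReq : List Int × List (List Int) := ([1, 2, 2, 1], [[1, 2]])

def Spec_findAnsReq (board : List Int) (targets : List (List Int)) (out : Option (List Int)) : Prop := out = findAnsReq_alt board targets
instance (board : List Int) (targets : List (List Int)) (out : Option (List Int)) : Decidable (Spec_findAnsReq board targets out) := by unfold Spec_findAnsReq; infer_instance

-- ===== CLAIM (what is proved, stated in full; the proofs are below) =====
def Claim_equal_findAnsReq : Prop := ∀ (board : List Int) (targets : List (List Int)), Dom_findAnsReq board targets → Pre_findAnsReq board targets → Spec_findAnsReq board targets (findAnsReq board targets)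

-- ===== LEMMAS AND PROOFS =====

-- A's two search functions seen as one function on a frame
def loopA (board : List Int) (size : Nat) (line : Int) (path : List Int) (sub : List Int) (isRow : Bool) (xs : List Int) : Option (List Int) :=
  if isRow then rowLoopA board size line path sub xs else colLoopA board size line path sub xs

def runA (board : List Int) (size : Nat) (f : Int × List Int × List Int × Bool) : Option (List Int) :=
  loopA board size f.1 f.2.1 f.2.2.1 f.2.2.2 (PySem.List.pyRange 0 (size : Int) 1)

-- running A's search on each frame of a list in turn, first success wins
def seqA (board : List Int) (size : Nat) : List (Int × List Int × List Int × Bool) → Option (List Int)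
  | [] => none
  | f :: rest =>
    match runA board size f with
    | some p => some p
    | none => seqA board size rest

theorem seqA_append (board : List Int) (size : Nat) (a b : List (Int × List Int × List Int × Bool)) :
    seqA board size (a ++ b) = match seqA board size a with
      | some p => some p
      | none => seqA board size b := by
  induction a with
  | nil => simp [seqA]
  | cons f a ih =>
    simp only [List.cons_append, seqA]
    cases runA board size f <;> simp [ih]

theorem frameScanB_ne_inl (board : List Int) (size : Nat) (line : Int) (path : List Int) (t0 : Int) (trest : List Int) (isRow : Bool)
    (ht : trest ≠ []) : ∀ (xs : List Int), ∃ cs, frameScanB board size line path (t0 :: trest) isRow xs = Sum.inr cs := by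
  intro xs
  induction xs with
  | nil => exact ⟨[], rfl⟩
  | cons x xs ih =>
    simp only [frameScanB]
    generalize (if isRow then line * (size : Int) + x else line + x * (size : Int)) = pos
    split_ifs with h1 h2
    · exact ih
    · exact ih
    · obtain ⟨cs, hcs⟩ := ih
      rw [hcs]
      exact ⟨_, rfl⟩

theorem rowLoopA_eq_scan (board : List Int) (size : Nat) (line : Int) (path : List Int) (sub : List Int) :
    ∀ (xs : List Int), rowLoopA board size line path sub xs =
      (match frameScanB board size line path sub true xs with
       | Sum.inl p => some p
       | Sum.inr cs => seqA board size cs) := by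
  cases sub with
  | nil =>
    intro xs
    rw [frameScanB_nil_sub]
    cases xs <;> simp [rowLoopA, seqA]
  | cons t0 trest =>
    intro xs
    induction xs with
    | nil => simp [rowLoopA, frameScanB, seqA]
    | cons x xs ih =>
      simp only [rowLoopA, frameScanB, if_true]
      split_ifs with h1 h2 h3
      · exact ih
      · exact ih
      · rfl
      · obtain ⟨cs, hcs⟩ := frameScanB_ne_inl board size line path t0 trest true h3 xs
        rw [hcs]
        rw [hcs] at ih
        simp only [seqA, runA, loopA]
        cases hc : colLoopA board size x (path ++ [line * (size : Int) + x]) trest (PySem.List.pyRange 0 (size : Int) 1) <;>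
          simp [ih]

theorem colLoopA_eq_scan (board : List Int) (size : Nat) (line : Int) (path : List Int) (sub : List Int) :
    ∀ (xs : List Int), colLoopA board size line path sub xs =
      (match frameScanB board size line path sub false xs with
       | Sum.inl p => some p
       | Sum.inr cs => seqA board size cs) := by
  cases sub with
  | nil =>
    intro xs
    rw [frameScanB_nil_sub]
    cases xs <;> simp [colLoopA, seqA]
  | cons t0 trest =>
    intro xs
    induction xs with
    | nil => simp [colLoopA, frameScanB, seqA]
    | cons x xs ih =>
      simp only [colLoopA, frameScanB, Bool.false_eq_true, if_false]
      split_ifs with h1 h2 h3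
      · exact ih
      · exact ih
      · rfl
      · obtain ⟨cs, hcs⟩ := frameScanB_ne_inl board size line path t0 trest false h3 xs
        rw [hcs]
        rw [hcs] at ih
        simp only [seqA, runA, loopA]
        cases hc : rowLoopA board size x (path ++ [line + x * (size : Int)]) trest (PySem.List.pyRange 0 (size : Int) 1) <;>
          simp [ih]

theorem runA_eq_scan (board : List Int) (size : Nat) (line : Int) (path : List Int) (sub : List Int) (isRow : Bool) :
    runA board size (line, path, sub, isRow) =
      (match frameScanB board size line path sub isRow (PySem.List.pyRange 0 (size : Int) 1) with
       | Sum.inl p => some p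
       | Sum.inr cs => seqA board size cs) := by
  cases isRow
  · exact colLoopA_eq_scan board size line path sub _
  · exact rowLoopA_eq_scan board size line path sub _

theorem stack_eq_seq (board : List Int) (size : Nat) :
    ∀ (n : Nat) (st : List (Int × List Int × List Int × Bool)),
      (st.map (frameWeight size)).sum < n → stackLoopB board size st = seqA board size st := by
  intro n
  induction n with
  | zero => intro st h; omega
  | succ n ih =>
    intro st h
    match st with
    | [] => simp [stackLoopB, seqA]
    | (line, path, sub, isRow) :: rest =>
      rw [stackLoopB]
      split
      · next p heq =>
        rw [seqA]
        have hr := runA_eq_scan board size line path sub isRow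
        rw [heq] at hr
        rw [hr]
      · next cs heq =>
        have hd := weight_decrease board size line path sub isRow rest cs heq
        rw [ih (cs ++ rest) (by omega), seqA_append]
        have hr := runA_eq_scan board size line path sub isRow
        rw [heq] at hr
        rw [seqA]
        rw [hr]

theorem findAnsReq_eq (board : List Int) (targets : List (List Int)) :
    findAnsReq board targets = findAnsReq_alt board targets := by
  unfold findAnsReq findAnsReq_alt
  generalize (pyPermsA targets).map reduceConcat = flats
  induction flats with
  | nil => simp [permLoopA, permLoopB]
  | cons t ts ih =>
    simp only [permLoopA, permLoopB]
    have h1 : stackLoopB board board.length.sqrt [(0, [], t, true)] = rowLoopA board board.length.sqrt 0 [] t (PySem.List.pyRange 0 (board.length.sqrt : Int) 1) := by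
      rw [stack_eq_seq board board.length.sqrt (([( (0 : Int), ([] : List Int), t, true)].map (frameWeight board.length.sqrt)).sum + 1) _ (by omega)]
      rw [seqA]
      have := rowLoopA_eq_scan board board.length.sqrt 0 [] t (PySem.List.pyRange 0 (board.length.sqrt : Int) 1)
      cases hA : rowLoopA board board.length.sqrt 0 [] t (PySem.List.pyRange 0 (board.length.sqrt : Int) 1) <;>
        simp [runA, loopA, seqA, hA]
    rw [h1, ih]

-- ===== VERDICT (by name: the statement is the Claim_ definition above) =====
theorem findAnsReq_spec : Claim_equal_findAnsReq := by
  intro board targets _ _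
  show findAnsReq board targets = findAnsReq_alt board targets
  exact findAnsReq_eq board targets
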